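-- pv_equiv track=rewrite | github.com/SamuraiJenkinz/inactive-mailbox-manager | src/utils/ps_parser.py | parse_hold_guids
-- ===== SOURCE A (Python) =====
-- def parse_hold_guids(in_place_holds: list[str] | None) -> list[dict[str, str]]:
--     """Parse InPlaceHolds GUID list into structured format.
--
--     Exchange Online holds are identified by GUIDs with prefixes:
--     - UniH: Unified Hold (eDiscovery)
--     - mbx: Mailbox-level hold
--     - skp: Skype for Business hold
--     - cld: Cloud-based hold
--     - grp: Group hold
--
--     Args:
--         in_place_holds: List of hold GUIDs from mailbox
--
--     Returns:
--         List of dicts with hold_id and hold_type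
--     """
--     if not in_place_holds:
--         return []
--
--     result = []
--     for hold in in_place_holds:
--         if not hold:
--             continue
--
--         hold_info: dict[str, str] = {
--             "hold_id": hold,
--             "hold_type": "unknown",
--             "hold_name": None,
--         }
--
--         # Identify hold type by prefix
--         if hold.startswith("UniH"):
--             hold_info["hold_type"] = "unified_hold"
--             hold_info["hold_name"] = "Unified eDiscovery Hold"
--         elif hold.startswith("mbx"):
--             hold_info["hold_type"] = "mailbox_hold"
--             hold_info["hold_name"] = "Mailbox Hold"
--         elif hold.startswith("skp"):
--             hold_info["hold_type"] = "skype_hold"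
--             hold_info["hold_name"] = "Skype for Business Hold"
--         elif hold.startswith("cld"):
--             hold_info["hold_type"] = "cloud_hold"
--             hold_info["hold_name"] = "Cloud Hold"
--         elif hold.startswith("grp"):
--             hold_info["hold_type"] = "group_hold"
--             hold_info["hold_name"] = "Group Hold"
--         elif "-" in hold and len(hold) == 36:
--             # Looks like a plain GUID - likely a retention policy
--             hold_info["hold_type"] = "retention_policy"
--             hold_info["hold_name"] = "Retention Policy"
--
--         result.append(hold_info)
--
--     return result
-- ===== SOURCE B (Python) =====
-- # B: constant-time dispatch on the first character (prefixes have distinct initials) plus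
-- # staged passes: filter non-empty, compute types, then render dicts via a type->name table.
--
-- _DISPATCH = {
--     "U": ("UniH", "unified_hold"),
--     "m": ("mbx", "mailbox_hold"),
--     "s": ("skp", "skype_hold"),
--     "c": ("cld", "cloud_hold"),
--     "g": ("grp", "group_hold"),
-- }
--
-- _NAMES = {
--     "unified_hold": "Unified eDiscovery Hold",
--     "mailbox_hold": "Mailbox Hold",
--     "skype_hold": "Skype for Business Hold",
--     "cloud_hold": "Cloud Hold",
--     "group_hold": "Group Hold",
--     "retention_policy": "Retention Policy",
--     "unknown": None,
-- }
--
--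
-- def _hold_type(hold):
--     entry = _DISPATCH.get(hold[0])
--     if entry is not None and hold.startswith(entry[0]):
--         return entry[1]
--     if "-" in hold and len(hold) == 36:
--         return "retention_policy"
--     return "unknown"
--
--
-- def parse_hold_guids(in_place_holds):
--     if not in_place_holds:
--         return []
--     holds = [h for h in in_place_holds if h]
--     types = [_hold_type(h) for h in holds]
--     return [
--         {"hold_id": h, "hold_type": t, "hold_name": _NAMES[t]}
--         for h, t in zip(holds, types)
--     ]
-- ===== Notes on version B (the rewrite author's own statement) =====
-- stated objective: alternative
-- what changed: Classification is dispatched in O(1) on the hold's first character via a dict keyed by the prefixes' distinct initials (then verified with one startswith), instead of A's ordered five-branch if/elif prefix ladder; the work is split into staged passes (filter non-empty, compute types, render dicts via a type->name table) instead of A's single loop mutating a per-item dict.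
import Mathlib
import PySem

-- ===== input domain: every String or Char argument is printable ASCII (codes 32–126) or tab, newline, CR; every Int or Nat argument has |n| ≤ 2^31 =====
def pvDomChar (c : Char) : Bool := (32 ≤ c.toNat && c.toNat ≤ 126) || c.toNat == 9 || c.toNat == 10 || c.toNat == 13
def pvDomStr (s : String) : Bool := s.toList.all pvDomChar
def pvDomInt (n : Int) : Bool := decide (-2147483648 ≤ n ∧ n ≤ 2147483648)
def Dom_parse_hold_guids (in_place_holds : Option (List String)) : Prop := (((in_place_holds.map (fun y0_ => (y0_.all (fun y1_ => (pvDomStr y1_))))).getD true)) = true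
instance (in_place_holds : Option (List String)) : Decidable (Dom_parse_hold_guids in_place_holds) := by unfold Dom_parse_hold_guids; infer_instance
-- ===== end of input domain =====

-- B replaces A's per-element if/elif prefix ladder by a constant-time dispatch on the first
-- character (the five prefixes have distinct initials) and splits the work into staged passes
-- (filter, type pass, render pass with a type->name table); return value only. Objective: alternative.

-- ===== PORT A =====
-- one loop body of A: build the default dict, then overwrite via the if/elif ladder
def pvAItem (hold : String) : List (String × Option String) :=
  let d : PySem.Dict String (Option String) :=
    PySem.Dict.ofList [("hold_id", some hold), ("hold_type", some "unknown"), ("hold_name", none)]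
  let d :=
    if PySem.Str.startswith hold "UniH" then
      (d.insert "hold_type" (some "unified_hold")).insert "hold_name" (some "Unified eDiscovery Hold")
    else if PySem.Str.startswith hold "mbx" then
      (d.insert "hold_type" (some "mailbox_hold")).insert "hold_name" (some "Mailbox Hold")
    else if PySem.Str.startswith hold "skp" then
      (d.insert "hold_type" (some "skype_hold")).insert "hold_name" (some "Skype for Business Hold")
    else if PySem.Str.startswith hold "cld" then
      (d.insert "hold_type" (some "cloud_hold")).insert "hold_name" (some "Cloud Hold")
    else if PySem.Str.startswith hold "grp" then
      (d.insert "hold_type" (some "group_hold")).insert "hold_name" (some "Group Hold")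
    else if PySem.Str.isIn "-" hold && PySem.Str.len hold == 36 then
      (d.insert "hold_type" (some "retention_policy")).insert "hold_name" (some "Retention Policy")
    else d
  d.items

def parse_hold_guids (in_place_holds : Option (List String)) : List (List (String × Option String)) :=
  match in_place_holds with
  | none => []
  | some holds =>
    if holds.isEmpty then []
    else holds.foldl (fun result hold =>
      if hold = "" then result else result ++ [pvAItem hold]) []

-- ===== PORT B =====
-- _DISPATCH: first character -> (full prefix, hold type)
def pvDispatch : PySem.Dict Char (String × String) :=
  PySem.Dict.ofList [('U', ("UniH", "unified_hold")), ('m', ("mbx", "mailbox_hold")),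
    ('s', ("skp", "skype_hold")), ('c', ("cld", "cloud_hold")), ('g', ("grp", "group_hold"))]

-- _NAMES: hold type -> display name
def pvNames : PySem.Dict String (Option String) :=
  PySem.Dict.ofList [("unified_hold", some "Unified eDiscovery Hold"),
    ("mailbox_hold", some "Mailbox Hold"), ("skype_hold", some "Skype for Business Hold"),
    ("cloud_hold", some "Cloud Hold"), ("group_hold", some "Group Hold"),
    ("retention_policy", some "Retention Policy"), ("unknown", none)]

-- _hold_type: hold[0] is ported with pyGet? / Option.bind (it is only called on non-empty strings)
def pvHoldType (hold : String) : String :=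
  match (PySem.Str.pyGet? hold 0).bind (fun c => pvDispatch.get? c) with
  | some (p, t) =>
    if PySem.Str.startswith hold p then t
    else if PySem.Str.isIn "-" hold && PySem.Str.len hold == 36 then "retention_policy"
    else "unknown"
  | none =>
    if PySem.Str.isIn "-" hold && PySem.Str.len hold == 36 then "retention_policy"
    else "unknown"

def parse_hold_guids_alt (in_place_holds : Option (List String)) : List (List (String × Option String)) :=
  match in_place_holds with
  | none => []
  | some hs =>
    if hs.isEmpty then []
    else
      let holds := hs.filter (fun h => h ≠ "")
      let types := holds.map pvHoldType
      (holds.zip types).map (fun ht =>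
        [("hold_id", some ht.1), ("hold_type", some ht.2),
         ("hold_name", (pvNames.get? ht.2).getD none)])

-- ===== PRECONDITION & SPEC =====
def Spec_parse_hold_guids (in_place_holds : Option (List String)) (out : List (List (String × Option String))) : Prop := out = parse_hold_guids_alt in_place_holds
instance (in_place_holds : Option (List String)) (out : List (List (String × Option String))) : Decidable (Spec_parse_hold_guids in_place_holds out) := by unfold Spec_parse_hold_guids; infer_instance

-- ===== CLAIM (what is proved, stated in full; the proofs are below) =====
def Claim_equal_parse_hold_guids : Prop := ∀ (in_place_holds : Option (List String)), Dom_parse_hold_guids in_place_holds → Spec_parse_hold_guids in_place_holds (parse_hold_guids in_place_holds)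

-- ===== LEMMAS AND PROOFS =====
-- the per-element classifications agree on non-empty strings
theorem pvDispatch_none (c : Char) (hU : ¬ 'U' = c) (hm : ¬ 'm' = c) (hs : ¬ 's' = c)
    (hc : ¬ 'c' = c) (hg : ¬ 'g' = c) : pvDispatch.get? c = none := by
  simp [pvDispatch, PySem.Dict.ofList, PySem.Dict.get?, PySem.Dict.insert, PySem.Dict.empty,
    PySem.Dict.update, PySem.Dict.contains, hU, hm, hs, hc, hg]

set_option maxHeartbeats 2000000 in
theorem pvItem_eq (hold : String) (hne : hold.toList ≠ []) :
    pvAItem hold = [("hold_id", some hold), ("hold_type", some (pvHoldType hold)),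
      ("hold_name", (pvNames.get? (pvHoldType hold)).getD none)] := by
  obtain ⟨c, rest, hcr⟩ := List.exists_cons_of_ne_nil hne
  have hget : PySem.Str.pyGet? hold 0 = some c := by
    simp [PySem.List.pyGet?, PySem.List.pyIdx?, hcr]
  simp only [pvAItem, pvHoldType, hget, Option.bind]
  by_cases hU : 'U' = c
  · subst hU
    have hd : pvDispatch.get? 'U' = some ("UniH", "unified_hold") := by decide
    rw [hd]
    simp [PySem.Dict.ofList, PySem.Dict.update, PySem.Dict.empty, PySem.Dict.insert,
      PySem.Dict.contains, pvNames, PySem.Dict.get?, hcr, PySem.Chars.startswith, List.isPrefixOf]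
    try split_ifs <;> simp_all
  · by_cases hm : 'm' = c
    · subst hm
      have hd : pvDispatch.get? 'm' = some ("mbx", "mailbox_hold") := by decide
      rw [hd]
      simp [PySem.Dict.ofList, PySem.Dict.update, PySem.Dict.empty, PySem.Dict.insert,
        PySem.Dict.contains, pvNames, PySem.Dict.get?, hcr, PySem.Chars.startswith, List.isPrefixOf]
      try split_ifs <;> simp_all
    · by_cases hs : 's' = c
      · subst hs
        have hd : pvDispatch.get? 's' = some ("skp", "skype_hold") := by decide
        rw [hd]
        simp [PySem.Dict.ofList, PySem.Dict.update, PySem.Dict.empty, PySem.Dict.insert,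
          PySem.Dict.contains, pvNames, PySem.Dict.get?, hcr, PySem.Chars.startswith, List.isPrefixOf]
        try split_ifs <;> simp_all
      · by_cases hc : 'c' = c
        · subst hc
          have hd : pvDispatch.get? 'c' = some ("cld", "cloud_hold") := by decide
          rw [hd]
          simp [PySem.Dict.ofList, PySem.Dict.update, PySem.Dict.empty, PySem.Dict.insert,
            PySem.Dict.contains, pvNames, PySem.Dict.get?, hcr, PySem.Chars.startswith, List.isPrefixOf]
          try split_ifs <;> simp_all
        · by_cases hg : 'g' = c
          · subst hg
            have hd : pvDispatch.get? 'g' = some ("grp", "group_hold") := by decide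
            rw [hd]
            simp [PySem.Dict.ofList, PySem.Dict.update, PySem.Dict.empty, PySem.Dict.insert,
              PySem.Dict.contains, pvNames, PySem.Dict.get?, hcr, PySem.Chars.startswith, List.isPrefixOf]
            try split_ifs <;> simp_all
          · have hd : pvDispatch.get? c = none := pvDispatch_none c hU hm hs hc hg
            rw [hd]
            simp [PySem.Dict.ofList, PySem.Dict.update, PySem.Dict.empty, PySem.Dict.insert,
              PySem.Dict.contains, pvNames, PySem.Dict.get?, hcr, PySem.Chars.startswith,
              List.isPrefixOf, hU, hm, hs, hc, hg]
            try split_ifs <;> simp_all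

-- A's accumulating loop equals filter-then-map of the per-element dict
theorem pvLoop_eq (holds : List String) (acc : List (List (String × Option String))) :
    holds.foldl (fun result hold =>
      if hold = "" then result else result ++ [pvAItem hold]) acc
    = acc ++ (holds.filter (fun h => h ≠ "")).map pvAItem := by
  induction holds generalizing acc with
  | nil => simp
  | cons h t ih =>
    by_cases hh : h = "" <;> simp [hh, ih, List.filter]

-- zipping a list with a mapped copy of itself is a single map
theorem pvZipMap_eq {α β γ : Type} (l : List α) (f : α → β) (g : α × β → γ) :
    (l.zip (l.map f)).map g = l.map (fun x => g (x, f x)) := by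
  induction l with
  | nil => rfl
  | cons x xs ih => simp [ih]

-- ===== VERDICT (by name: the statement is the Claim_ definition above) =====
theorem parse_hold_guids_spec : Claim_equal_parse_hold_guids := by
  intro o _
  unfold Spec_parse_hold_guids parse_hold_guids parse_hold_guids_alt
  cases o with
  | none => rfl
  | some holds =>
    by_cases he : holds.isEmpty
    · simp [he]
    · simp only [he, if_neg, Bool.false_eq_true, not_false_eq_true, pvLoop_eq, List.nil_append,
        pvZipMap_eq]
      refine List.map_congr_left (fun x hx => pvItem_eq x ?_)
      have hx' : x ≠ "" := of_decide_eq_true (List.mem_filter.mp hx).2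
      exact fun h => hx' (String.toList_eq_nil_iff.mp h)
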